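-- pv_equiv track=rewrite | github.com/ThrudPrimrose/SC26-Layout-Artifacts | Microbenchmarks/Zekin_Loopnest_v3/Analysis/coaccess.py | build_equivalence_classes
-- ===== SOURCE A (Python) =====
-- from collections import defaultdict
--
-- def build_equivalence_classes(a2n):
--     """Group arrays with identical nest-membership sets."""
--     key_to_arrays = defaultdict(list)
--     for arr, nids in a2n.items():
--         key_to_arrays[frozenset(nids)].append(arr)
--     groups = []
--     for nids, arrays in sorted(key_to_arrays.items(),
--                                 key=lambda x: (-len(x[1]), sorted(x[0]))):
--         groups.append((nids, sorted(arrays)))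
--     return groups
-- ===== SOURCE B (Python) =====
-- def build_equivalence_classes(a2n):
--     """Group arrays with identical nest-membership sets (no dict accumulation:
--     distinct keys collected in order, each group's arrays gathered by a filter pass)."""
--     pairs = [(frozenset(nids), arr) for arr, nids in a2n.items()]
--     keys = []
--     seen = set()
--     for k, _ in pairs:
--         if k not in seen:
--             seen.add(k)
--             keys.append(k)
--     groups = [(k, sorted(arr for f, arr in pairs if f == k)) for k in keys]
--     groups.sort(key=lambda g: (-len(g[1]), sorted(g[0])))
--     return groups
-- ===== Notes on version B (the rewrite author's own statement) =====
-- stated objective: alternative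
-- what changed: Replaces A's defaultdict hash accumulation with an ordered list of distinct frozenset keys plus a per-key filter pass over the items to gather each group's arrays, then the same final sort; no dict is used.
import Mathlib
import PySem

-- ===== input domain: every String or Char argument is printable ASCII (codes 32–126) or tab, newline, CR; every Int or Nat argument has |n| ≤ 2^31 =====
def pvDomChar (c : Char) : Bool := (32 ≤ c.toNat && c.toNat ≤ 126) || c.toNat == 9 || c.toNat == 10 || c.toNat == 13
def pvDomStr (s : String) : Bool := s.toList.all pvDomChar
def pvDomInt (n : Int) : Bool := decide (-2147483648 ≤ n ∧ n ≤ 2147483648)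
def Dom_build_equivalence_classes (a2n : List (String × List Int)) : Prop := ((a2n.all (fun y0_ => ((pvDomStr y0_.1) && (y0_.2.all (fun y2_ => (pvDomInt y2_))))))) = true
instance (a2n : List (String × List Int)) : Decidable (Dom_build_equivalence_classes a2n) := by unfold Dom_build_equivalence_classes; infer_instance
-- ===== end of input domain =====

-- B replaces A's defaultdict hash accumulation by an ordered list of distinct keys plus a
-- per-key filter pass (objective: alternative decomposition, no dict; not claimed faster).
-- frozenset(nids) is represented on both sides by its canonical sorted duplicate-free list
-- (Python frozenset equality is set equality, and distinct sets have distinct sorted lists,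
-- so grouping and the sort key sorted(x[0]) are exact under this representation).

-- ===== PORT A =====
-- frozenset(nids), canonically: sorted list of the distinct elements
def pvCanon (nids : List Int) : List Int :=
  PySem.List.sorted (PySem.Set.ofList nids) (fun x => x) false

def build_equivalence_classes (a2n : List (String × List Int)) : List (List Int × List String) :=
  -- for arr, nids in a2n.items(): key_to_arrays[frozenset(nids)].append(arr)
  let items := (PySem.Dict.ofList a2n).items
  let key_to_arrays : PySem.Dict (List Int) (List String) :=
    items.foldl (fun d p => d.modify (pvCanon p.2) [] (fun l => l ++ [p.1])) PySem.Dict.empty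
  -- sorted(key_to_arrays.items(), key=lambda x: (-len(x[1]), sorted(x[0])));
  -- sorted(x[0]) is x.1 itself: the key is already the canonical sorted list
  let srt := PySem.List.sorted2 key_to_arrays.items
      (fun x => -(x.2.length : Int)) (fun x => x.1) false
  -- groups.append((nids, sorted(arrays)))
  srt.foldl (fun groups p => groups ++ [(p.1, PySem.List.sorted p.2 (fun a => a) false)]) []

-- ===== PORT B =====
def build_equivalence_classes_alt (a2n : List (String × List Int)) : List (List Int × List String) :=
  let items := (PySem.Dict.ofList a2n).items
  -- pairs = [(frozenset(nids), arr) for arr, nids in a2n.items()]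
  let pairs := items.map (fun p => (pvCanon p.2, p.1))
  -- keys = []; seen = set(); for k, _ in pairs: if k not in seen: seen.add(k); keys.append(k)
  -- (the seen-set/keys-list pair is exactly PySem.Set: distinct elements, first-appearance order)
  let keys : PySem.Set (List Int) :=
    pairs.foldl (fun s q => PySem.Set.add s q.1) PySem.Set.empty
  -- groups = [(k, sorted(arr for f, arr in pairs if f == k)) for k in keys]
  let groups := keys.map (fun k =>
      (k, PySem.List.sorted ((pairs.filter (fun q => q.1 == k)).map (fun q => q.2))
            (fun a => a) false))
  -- groups.sort(key=lambda g: (-len(g[1]), sorted(g[0])))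
  PySem.List.sorted2 groups (fun g => -(g.2.length : Int)) (fun g => g.1) false

-- ===== PRECONDITION & SPEC =====
def Spec_build_equivalence_classes (a2n : List (String × List Int)) (out : List (List Int × List String)) : Prop := out = build_equivalence_classes_alt a2n
instance (a2n : List (String × List Int)) (out : List (List Int × List String)) : Decidable (Spec_build_equivalence_classes a2n out) := by unfold Spec_build_equivalence_classes; infer_instance

-- ===== CLAIM (what is proved, stated in full; the proofs are below) =====
def Claim_equal_build_equivalence_classes : Prop := ∀ (a2n : List (String × List Int)), Dom_build_equivalence_classes a2n → Spec_build_equivalence_classes a2n (build_equivalence_classes a2n)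

-- ===== LEMMAS AND PROOFS =====

lemma insertBy_map {α β : Type} (before : α → α → Bool) (f : β → α) (x : β) (l : List β) :
    PySem.List.insertBy before (f x) (l.map f)
      = (PySem.List.insertBy (fun a b => before (f a) (f b)) x l).map f := by
  induction l with
  | nil => simp [PySem.List.insertBy]
  | cons y ys ih =>
    simp only [List.map_cons, PySem.List.insertBy]
    by_cases h : before (f x) (f y) = true <;> simp [h, ih]

lemma foldl_insertBy_map {α β : Type} (before : α → α → Bool) (f : β → α) (xs : List β)
    (acc : List β) :
    xs.foldl (fun acc x => PySem.List.insertBy before (f x) acc) (acc.map f)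
      = (xs.foldl (fun acc x => PySem.List.insertBy (fun a b => before (f a) (f b)) x acc) acc).map f := by
  induction xs generalizing acc with
  | nil => simp
  | cons x xs ih =>
    simp only [List.foldl_cons, insertBy_map]
    exact ih _

lemma sorted2_map {α β κ₁ κ₂ : Type} [LT κ₁] [DecidableLT κ₁] [LT κ₂] [DecidableLT κ₂]
    (f : β → α) (xs : List β) (k1 : α → κ₁) (k2 : α → κ₂) :
    PySem.List.sorted2 (xs.map f) k1 k2 false
      = (PySem.List.sorted2 xs (fun x => k1 (f x)) (fun x => k2 (f x)) false).map f := by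
  simp only [PySem.List.sorted2, if_neg (by decide : ¬ (false = true)), List.foldl_map]
  exact foldl_insertBy_map _ f xs []

-- the accumulated defaultdict's items, as keys-in-first-appearance-order with filtered values
lemma dict_items_eq (l : List (String × List Int)) :
    (l.foldl (fun d p => d.modify (pvCanon p.2) [] (fun v => v ++ [p.1])) PySem.Dict.empty).items
      = (PySem.Set.ofList ((l.map (fun p => (pvCanon p.2, p.1))).map (fun q => q.1))).map
          (fun k => (k, ((l.map (fun p => (pvCanon p.2, p.1))).filter (fun q => q.1 == k)).map
              (fun q => q.2))) := by
  have hnd : (l.foldl (fun d p => d.modify (pvCanon p.2) [] (fun v => v ++ [p.1]))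
      PySem.Dict.empty).keys.Nodup :=
    PySem.Dict.nodup_keys_foldl_modify_key l (fun p => pvCanon p.2) []
      (fun d p => (fun v => v ++ [p.1])) PySem.Dict.empty PySem.Dict.nodup_keys_empty
  rw [PySem.Dict.items_eq_map_keys _ hnd []]
  rw [PySem.Dict.keys_foldl_modify_key]
  rw [PySem.Dict.keys_empty, PySem.Set.update_nil_left, List.map_map]
  apply List.map_congr_left
  intro k _
  congr 1
  -- getD of the grouping fold is the filtered values
  have := PySem.Dict.getD_foldl_modify_append
    (l := l.map (fun p => (pvCanon p.2, p.1))) (d := PySem.Dict.empty) (c := k)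
  rw [List.foldl_map] at this
  simp only [this, PySem.Dict.getD_empty, List.nil_append]

lemma main_eq (l : List (String × List Int)) :
    (PySem.List.sorted2
        ((l.foldl (fun d p => d.modify (pvCanon p.2) [] (fun v => v ++ [p.1]))
            PySem.Dict.empty).items)
        (fun x => -(x.2.length : Int)) (fun x => x.1) false).foldl
      (fun groups p => groups ++ [(p.1, PySem.List.sorted p.2 (fun a => a) false)]) []
    = PySem.List.sorted2
        (((l.map (fun p => (pvCanon p.2, p.1))).foldl (fun s q => PySem.Set.add s q.1)
            PySem.Set.empty).map
          (fun k => (k, PySem.List.sorted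
              (((l.map (fun p => (pvCanon p.2, p.1))).filter (fun q => q.1 == k)).map (fun q => q.2))
              (fun a => a) false)))
        (fun g => -(g.2.length : Int)) (fun g => g.1) false := by
  have hkeys : (l.map (fun p => (pvCanon p.2, p.1))).foldl (fun s q => PySem.Set.add s q.1)
      PySem.Set.empty
      = PySem.Set.ofList ((l.map (fun p => (pvCanon p.2, p.1))).map (fun q => q.1)) := by
    rw [PySem.Set.ofList_eq_foldl, List.map_map]
    conv_rhs => rw [List.foldl_map]
    conv_lhs => rw [List.foldl_map]
    rfl
  rw [hkeys, dict_items_eq, PySem.List.foldl_append_singleton_eq_map, List.nil_append]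
  have hmap : (PySem.Set.ofList ((l.map (fun p => (pvCanon p.2, p.1))).map (fun q => q.1))).map
      (fun k => (k, PySem.List.sorted
          (((l.map (fun p => (pvCanon p.2, p.1))).filter (fun q => q.1 == k)).map (fun q => q.2))
          (fun a => a) false))
      = ((PySem.Set.ofList ((l.map (fun p => (pvCanon p.2, p.1))).map (fun q => q.1))).map
          (fun k => (k, ((l.map (fun p => (pvCanon p.2, p.1))).filter (fun q => q.1 == k)).map
              (fun q => q.2)))).map
        (fun q => (q.1, PySem.List.sorted q.2 (fun a => a) false)) := by
    simp [List.map_map]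
  rw [hmap]
  conv_lhs => rw [sorted2_map]
  conv_rhs => rw [List.map_map]
  conv_rhs => rw [sorted2_map]
  rw [List.map_map]
  simp [Function.comp, PySem.List.length_sorted]

-- ===== VERDICT (by name: the statement is the Claim_ definition above) =====
theorem build_equivalence_classes_spec : Claim_equal_build_equivalence_classes := by
  intro a2n _
  unfold Spec_build_equivalence_classes build_equivalence_classes build_equivalence_classes_alt
  exact main_eq ((PySem.Dict.ofList a2n).items)
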